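-- pv_equiv track=rewrite | github.com/dcschenc/myleetcode | 1979-maximum-number-of-people-that-can-be-caught-in-tag/1979-maximum-number-of-people-that-can-be-caught-in-tag.py | catchMaximumAmountofPeople
-- ===== SOURCE A (Python) =====
-- from typing import List
--
-- from collections import deque
--
-- def catchMaximumAmountofPeople(team: List[int], dist: int) -> int:
--     ans = j = 0
--     n = len(team)
--     for i, x in enumerate(team):
--         if x:
--             while j < n and (team[j] or i - j > dist):
--                 j += 1
--             if j < n and abs(i - j) <= dist:
--                 ans += 1
--                 j += 1
--     return ans
--
--     cnt = 0
--     n = len(team)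
--     zeros = deque()
--     ones = deque()
--     for i in range(n):
--         if team[i] == 0:
--             if len(ones) > 0:
--                 cnt += 1
--                 ones.popleft()
--             else:
--                 zeros.append(i)
--         else:
--             if len(zeros) > 0:
--                 cnt += 1
--                 zeros.popleft()
--             else:
--                 ones.append(i)
--
--         if ones and i - ones[0] >= dist:
--             ones.popleft()
--         if zeros and i - zeros[0] >= dist:
--             zeros.popleft()
--     return cnt
-- ===== SOURCE B (Python) =====
-- from collections import deque
--
-- def catchMaximumAmountofPeople(team, dist):
--     cnt = 0
--     kind = 0
--     pending = deque()  # unmatched indices, all of the same kind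
--     for i, x in enumerate(team):
--         k = 1 if x else 0
--         if pending and kind != k:
--             cnt += 1
--             pending.popleft()
--         else:
--             kind = k
--             pending.append(i)
--         if pending and i - pending[0] >= dist:
--             pending.popleft()
--     return cnt
-- ===== Notes on version B (the rewrite author's own statement) =====
-- stated objective: alternative
-- what changed: Replaces A's pointer-into-the-array greedy (inner while advancing j over the raw list for each tagger) with a sliding-window queue greedy: one FIFO of unmatched indices (all necessarily of one kind), matching an arriving person of the opposite kind against its head and evicting heads that leave the distance window.
import Mathlib
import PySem

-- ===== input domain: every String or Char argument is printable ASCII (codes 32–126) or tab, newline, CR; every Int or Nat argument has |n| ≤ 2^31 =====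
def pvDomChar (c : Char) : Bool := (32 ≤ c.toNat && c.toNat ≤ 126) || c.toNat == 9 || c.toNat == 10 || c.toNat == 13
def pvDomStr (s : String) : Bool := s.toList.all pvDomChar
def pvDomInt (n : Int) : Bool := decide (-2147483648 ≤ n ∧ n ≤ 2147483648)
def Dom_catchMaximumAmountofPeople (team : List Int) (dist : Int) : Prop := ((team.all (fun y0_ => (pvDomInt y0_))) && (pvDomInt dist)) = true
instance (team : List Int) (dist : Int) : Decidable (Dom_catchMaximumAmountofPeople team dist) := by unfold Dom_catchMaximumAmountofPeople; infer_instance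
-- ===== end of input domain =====

-- B replaces A's pointer-scan greedy with a sliding-window single-queue greedy (objective: alternative).

-- ===== PORT A =====
-- the inner `while j < n and (team[j] or i - j > dist): j += 1` loop of A
def pvAdvJ (team : List Int) (dist : Int) (i : Int) (j : Nat) : Nat :=
  if h : j < team.length then
    if team[j] ≠ 0 ∨ i - (j : Int) > dist then pvAdvJ team dist i (j + 1) else j
  else j
termination_by team.length - j

def catchMaximumAmountofPeople (team : List Int) (dist : Int) : Int :=
  ((PySem.List.enumerate team 0).foldl (fun (s : Int × Nat) (p : Int × Int) =>
    if p.2 ≠ 0 then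
      (let j' := pvAdvJ team dist p.1 s.2;
       if j' < team.length ∧ |p.1 - (j' : Int)| ≤ dist then (s.1 + 1, j' + 1) else (s.1, j'))
    else s) ((0 : Int), (0 : Nat))).1

-- ===== PORT B =====
-- one iteration of Source B's loop: state = (cnt, kind, pending queue of unmatched indices)
def pvStepB (dist : Int) (s : Int × Int × List Int) (p : Int × Int) : Int × Int × List Int :=
  let k : Int := if p.2 ≠ 0 then 1 else 0
  let s1 : Int × Int × List Int :=
    if s.2.2 ≠ [] ∧ s.2.1 ≠ k then (s.1 + 1, s.2.1, s.2.2.tail)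
    else (s.1, k, s.2.2 ++ [p.1])
  match s1.2.2 with
  | q :: rest => if p.1 - q ≥ dist then (s1.1, s1.2.1, rest) else s1
  | [] => s1

def catchMaximumAmountofPeople_alt (team : List Int) (dist : Int) : Int :=
  ((PySem.List.enumerate team 0).foldl (pvStepB dist) ((0 : Int), (0 : Int), ([] : List Int))).1

-- ===== PRECONDITION & SPEC =====
def Spec_catchMaximumAmountofPeople (team : List Int) (dist : Int) (out : Int) : Prop := out = catchMaximumAmountofPeople_alt team dist
instance (team : List Int) (dist : Int) (out : Int) : Decidable (Spec_catchMaximumAmountofPeople team dist out) := by unfold Spec_catchMaximumAmountofPeople; infer_instance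

-- ===== CLAIM (what is proved, stated in full; the proofs are below) =====
def Claim_equal_catchMaximumAmountofPeople : Prop := ∀ (team : List Int) (dist : Int), Dom_catchMaximumAmountofPeople team dist → Spec_catchMaximumAmountofPeople team dist (catchMaximumAmountofPeople team dist)

-- ===== LEMMAS AND PROOFS =====

-- ghost greedy merge of the two index lists; both ports are reduced to it
def pvMerge (dist : Int) : List Int → List Int → Int
  | o :: os, z :: zs =>
    if o - z > dist then pvMerge dist (o :: os) zs
    else if z - o > dist then pvMerge dist os (z :: zs)
    else 1 + pvMerge dist os zs
  | _, _ => 0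
termination_by l1 l2 => l1.length + l2.length

-- indices k ∈ [i, length) with team[k] ≠ 0 (resp. = 0)
def pvOnesFrom (team : List Int) (i : Nat) : List Int :=
  if h : i < team.length then
    (if team[i] ≠ 0 then [(i : Int)] else []) ++ pvOnesFrom team (i + 1)
  else []
termination_by team.length - i

def pvZerosFrom (team : List Int) (i : Nat) : List Int :=
  if h : i < team.length then
    (if team[i] = 0 then [(i : Int)] else []) ++ pvZerosFrom team (i + 1)
  else []
termination_by team.length - i

-- value of B's remaining run as a function of its queue state
def pvVal (dist kind : Int) (pending os zs : List Int) : Int :=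
  if kind ≠ 0 then pvMerge dist (pending ++ os) zs else pvMerge dist os (pending ++ zs)

lemma pvMerge_nil_right (dist : Int) (os : List Int) : pvMerge dist os [] = 0 := by
  cases os <;> simp [pvMerge]

lemma pvMerge_nil_left (dist : Int) (zs : List Int) : pvMerge dist [] zs = 0 := by
  cases zs <;> simp [pvMerge]

lemma pvOnesFrom_stop (team : List Int) (i : Nat) (h : team.length ≤ i) :
    pvOnesFrom team i = [] := by
  unfold pvOnesFrom; rw [dif_neg (by omega)]

lemma pvZerosFrom_stop (team : List Int) (i : Nat) (h : team.length ≤ i) :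
    pvZerosFrom team i = [] := by
  unfold pvZerosFrom; rw [dif_neg (by omega)]

lemma pvOnesFrom_ge (team : List Int) (i : Nat) :
    ∀ o ∈ pvOnesFrom team i, (i : Int) ≤ o := by
  fun_induction pvOnesFrom team i with
  | case1 i h ih =>
    intro o ho
    rcases List.mem_append.mp ho with h1 | h2
    · split at h1 <;> simp_all
    · have := ih o h2; omega
  | case2 i h => simp

lemma pvZerosFrom_ge (team : List Int) (i : Nat) :
    ∀ z ∈ pvZerosFrom team i, (i : Int) ≤ z := by
  fun_induction pvZerosFrom team i with
  | case1 i h ih =>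
    intro z hz
    rcases List.mem_append.mp hz with h1 | h2
    · split at h1 <;> simp_all
    · have := ih z h2; omega
  | case2 i h => simp

-- dropping a stale head tagger is invisible to pvMerge
lemma pvMerge_skip_one (dist h : Int) (os zs : List Int)
    (hz : ∀ z ∈ zs, z - h > dist) (ho : ∀ o ∈ os, h < o) :
    pvMerge dist (h :: os) zs = pvMerge dist os zs := by
  induction zs with
  | nil => rw [pvMerge_nil_right, pvMerge_nil_right]
  | cons z zs' ih =>
    have hzh : z - h > dist := hz z (by simp)
    by_cases hfar : h - z > dist
    · rw [pvMerge, if_pos hfar, ih (fun z hz' => hz z (by simp [hz']))]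
      cases os with
      | nil => rw [pvMerge_nil_left, pvMerge_nil_left]
      | cons o os' =>
        have : o - z > dist := by have := ho o (by simp); omega
        rw [pvMerge, if_pos this]
    · rw [pvMerge, if_neg hfar, if_pos hzh]

-- dropping a stale head non-tagger is invisible to pvMerge
lemma pvMerge_skip_zero (dist h : Int) (os zs : List Int)
    (ho : ∀ o ∈ os, o - h > dist) :
    pvMerge dist os (h :: zs) = pvMerge dist os zs := by
  cases os with
  | nil => rw [pvMerge_nil_left, pvMerge_nil_left]
  | cons o os' => rw [pvMerge, if_pos (ho o (by simp))]

lemma pvAdvJ_post (team : List Int) (dist i : Int) (j : Nat) :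
    team.length ≤ pvAdvJ team dist i j ∨
      (∃ h : pvAdvJ team dist i j < team.length,
        team[pvAdvJ team dist i j] = 0 ∧ i - (pvAdvJ team dist i j : Int) ≤ dist) := by
  fun_induction pvAdvJ team dist i j with
  | case1 j h hc ih => exact ih
  | case2 j h hc =>
    push Not at hc
    exact Or.inr ⟨h, hc.1, hc.2⟩
  | case3 j h =>
    exact Or.inl (by omega)

lemma pvAdvJ_merge (team : List Int) (dist i : Int) (os : List Int) (j : Nat) :
    pvMerge dist (i :: os) (pvZerosFrom team j)
      = pvMerge dist (i :: os) (pvZerosFrom team (pvAdvJ team dist i j)) := by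
  fun_induction pvAdvJ team dist i j with
  | case1 j h hc ih =>
    rw [← ih]
    by_cases hz : team[j] = 0
    · have hgt : i - (j : Int) > dist := hc.resolve_left (not_not_intro hz)
      rw [pvZerosFrom, dif_pos h, if_pos hz, List.singleton_append, pvMerge, if_pos hgt]
    · rw [pvZerosFrom, dif_pos h, if_neg hz, List.nil_append]
  | case2 j h hc => rfl
  | case3 j h => rfl

lemma pvLoopA (team : List Int) (dist : Int) (ts : List Int) (i : Nat) (ans : Int) (j : Nat)
    (h : team.drop i = ts) :
    ((PySem.List.enumerate ts (i : Int)).foldl (fun (s : Int × Nat) (p : Int × Int) =>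
      if p.2 ≠ 0 then
        (let j' := pvAdvJ team dist p.1 s.2;
         if j' < team.length ∧ |p.1 - (j' : Int)| ≤ dist then (s.1 + 1, j' + 1) else (s.1, j'))
      else s) (ans, j)).1
      = ans + pvMerge dist (pvOnesFrom team i) (pvZerosFrom team j) := by
  induction ts generalizing i ans j with
  | nil =>
    rw [pvOnesFrom_stop team i (List.drop_eq_nil_iff.mp h)]
    simp [PySem.List.enumerate_nil, pvMerge_nil_left]
  | cons x rest ih =>
    have hlen : i < team.length := by
      by_contra hcon
      rw [List.drop_eq_nil_of_le (by omega)] at h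
      exact absurd h (by simp)
    rw [List.drop_eq_getElem_cons hlen] at h
    obtain ⟨hx, hrest⟩ := List.cons.inj h
    have hcast : (i : Int) + 1 = ((i + 1 : Nat) : Int) := by push_cast; ring
    rw [PySem.List.enumerate_cons, List.foldl_cons, hcast]
    by_cases hx0 : x = 0
    · rw [if_neg (by simp [hx0])]
      rw [pvOnesFrom, dif_pos hlen, if_neg (by simp [hx, hx0]), List.nil_append,
        ih (i + 1) ans j hrest]
    · rw [if_pos (by simp [hx0])]
      have hO : pvOnesFrom team i = (i : Int) :: pvOnesFrom team (i + 1) := by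
        rw [pvOnesFrom, dif_pos hlen, if_pos (by simp [hx, hx0]), List.singleton_append]
      have hM := pvAdvJ_merge team dist (i : Int) (pvOnesFrom team (i + 1)) j
      rcases pvAdvJ_post team dist (i : Int) j with hpost | ⟨hl, hz, hle⟩
      · rw [if_neg (by simp only [not_and]; intro hlt; omega)]
        rw [ih (i + 1) ans _ hrest, hO, hM,
          pvZerosFrom_stop team _ hpost, pvMerge_nil_right, pvMerge_nil_right]
      · have hZ : pvZerosFrom team (pvAdvJ team dist (i : Int) j)
            = ((pvAdvJ team dist (i : Int) j : Nat) : Int)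
              :: pvZerosFrom team (pvAdvJ team dist (i : Int) j + 1) := by
          rw [pvZerosFrom, dif_pos hl, if_pos hz, List.singleton_append]
        by_cases habs : |(i : Int) - (pvAdvJ team dist (i : Int) j : Int)| ≤ dist
        · rw [if_pos ⟨hl, habs⟩, ih (i + 1) (ans + 1) _ hrest, hO, hM, hZ, pvMerge,
            if_neg (by omega), if_neg (by rw [abs_le] at habs; omega)]
          ring
        · have hgt : ((pvAdvJ team dist (i : Int) j : Nat) : Int) - (i : Int) > dist := by
            rw [abs_le] at habs; omega
          rw [if_neg (by simp only [not_and]; intro _; exact habs),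
            ih (i + 1) ans _ hrest, hO, hM, hZ, pvMerge, if_neg (by omega), if_pos hgt, ← hZ]

-- coupling invariant for B's queue loop
lemma pvLoopB (team : List Int) (dist : Int) (ts : List Int) (i : Nat)
    (cnt kind : Int) (pending : List Int)
    (h : team.drop i = ts)
    (hk : kind = 0 ∨ kind = 1)
    (hpw : pending.Pairwise (· < ·))
    (hmem : ∀ p ∈ pending, (i : Int) - dist ≤ p ∧ p < (i : Int)) :
    ((PySem.List.enumerate ts (i : Int)).foldl (pvStepB dist) (cnt, kind, pending)).1
      = cnt + pvVal dist kind pending (pvOnesFrom team i) (pvZerosFrom team i) := by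
  induction ts generalizing i cnt kind pending with
  | nil =>
    have hstop : team.length ≤ i := List.drop_eq_nil_iff.mp h
    rw [pvOnesFrom_stop team i hstop, pvZerosFrom_stop team i hstop]
    unfold pvVal
    split <;> simp [PySem.List.enumerate_nil, pvMerge_nil_left, pvMerge_nil_right]
  | cons x rest ih =>
    have hlen : i < team.length := by
      by_contra hcon
      rw [List.drop_eq_nil_of_le (by omega)] at h
      exact absurd h (by simp)
    rw [List.drop_eq_getElem_cons hlen] at h
    obtain ⟨hx, hrest⟩ := List.cons.inj h
    have hcast : (i : Int) + 1 = ((i + 1 : Nat) : Int) := by push_cast; ring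
    rw [PySem.List.enumerate_cons, List.foldl_cons, hcast]
    have hge_o : ∀ o ∈ pvOnesFrom team (i + 1), (i : Int) < o := by
      intro o ho
      have := pvOnesFrom_ge team (i + 1) o ho
      push_cast at this; omega
    have hge_z : ∀ z ∈ pvZerosFrom team (i + 1), (i : Int) < z := by
      intro z hz
      have := pvZerosFrom_ge team (i + 1) z hz
      push_cast at this; omega
    by_cases hx0 : x = 0
    · -- a non-tagger arrives
      have hOi : pvOnesFrom team i = pvOnesFrom team (i + 1) := by
        rw [pvOnesFrom, dif_pos hlen, if_neg (by simp [hx, hx0]), List.nil_append]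
      have hZi : pvZerosFrom team i = (i : Int) :: pvZerosFrom team (i + 1) := by
        rw [pvZerosFrom, dif_pos hlen, if_pos (by simp [hx, hx0]), List.singleton_append]
      cases pending with
      | nil =>
        by_cases hd : (0 : Int) ≥ dist
        · have hstep : pvStepB dist (cnt, kind, []) ((i : Int), x) = (cnt, 0, []) := by
            simp [pvStepB, hx0, hd]
          rw [hstep, ih (i + 1) cnt 0 [] hrest (Or.inl rfl) (by simp) (by simp)]
          rw [hOi, hZi]
          have hsz := pvMerge_skip_zero dist (i : Int) (pvOnesFrom team (i + 1))
            (pvZerosFrom team (i + 1)) (fun o ho => by have := hge_o o ho; omega)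
          rcases hk with hk | hk <;> simp [pvVal, hk, hsz]
        · have hstep : pvStepB dist (cnt, kind, []) ((i : Int), x) = (cnt, 0, [(i : Int)]) := by
            simp [pvStepB, hx0, hd]
          rw [hstep, ih (i + 1) cnt 0 [(i : Int)] hrest (Or.inl rfl) (by simp)
            (by simp; omega)]
          rw [hOi, hZi]
          rcases hk with hk | hk <;> simp [pvVal, hk]
      | cons p0 ptail =>
        obtain ⟨hp0l, hp0u⟩ := hmem p0 (by simp)
        have hdist1 : (1 : Int) ≤ dist := by omega
        rcases List.pairwise_cons.mp hpw with ⟨hlt, hpw'⟩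
        rcases hk with hk | hk
        · -- pending are non-taggers too: enqueue, maybe evict the head
          subst hk
          have hpwApp : (ptail ++ [(i : Int)]).Pairwise (· < ·) :=
            List.pairwise_append.mpr ⟨hpw', List.pairwise_singleton _ _,
              (by intro a ha b hb; simp at hb; subst hb; exact (hmem a (by simp [ha])).2)⟩
          by_cases hev : (i : Int) - p0 ≥ dist
          · have hstep : pvStepB dist (cnt, 0, p0 :: ptail) ((i : Int), x)
                = (cnt, 0, ptail ++ [(i : Int)]) := by
              simp [pvStepB, hx0, hev]
            rw [hstep, ih (i + 1) cnt 0 (ptail ++ [(i : Int)]) hrest (Or.inl rfl) hpwApp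
              (by
                intro p hp
                rcases List.mem_append.mp hp with hp | hp
                · have := hmem p (by simp [hp]); have := hlt p hp; push_cast; omega
                · simp at hp; subst hp; push_cast; omega)]
            rw [hOi, hZi]
            have hsz := pvMerge_skip_zero dist p0 (pvOnesFrom team (i + 1))
              (ptail ++ (i : Int) :: pvZerosFrom team (i + 1))
              (fun o ho => by have := hge_o o ho; omega)
            simp [pvVal, hsz, List.append_assoc]
          · have hstep : pvStepB dist (cnt, 0, p0 :: ptail) ((i : Int), x)
                = (cnt, 0, p0 :: ptail ++ [(i : Int)]) := by
              simp [pvStepB, hx0, hev]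
            rw [hstep, ih (i + 1) cnt 0 (p0 :: ptail ++ [(i : Int)]) hrest (Or.inl rfl)
              (List.pairwise_cons.mpr ⟨(by
                  intro a ha
                  rcases List.mem_append.mp ha with ha | ha
                  · exact hlt a ha
                  · simp at ha; subst ha; omega), hpwApp⟩)
              (by
                intro p hp
                rcases List.mem_cons.mp hp with hp | hp
                · subst hp; push_cast; omega
                · rcases List.mem_append.mp hp with hp | hp
                  · have := hmem p (by simp [hp]); have := hlt p hp; push_cast; omega
                  · simp at hp; subst hp; push_cast; omega)]
            rw [hOi, hZi]
            simp [pvVal, List.append_assoc]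
        · -- pending are taggers: match the head, eviction cannot fire
          subst hk
          have hstep : pvStepB dist (cnt, 1, p0 :: ptail) ((i : Int), x)
              = (cnt + 1, 1, ptail) := by
            cases ptail with
            | nil => simp [pvStepB, hx0]
            | cons q r =>
              have hq : ¬ ((i : Int) - q ≥ dist) := by
                have := hlt q (by simp); omega
              simp [pvStepB, hx0, hq]
          rw [hstep, ih (i + 1) (cnt + 1) 1 ptail hrest (Or.inr rfl) hpw'
            (by intro p hp; have := hmem p (by simp [hp]); have := hlt p hp; push_cast; omega)]
          rw [hOi, hZi]
          unfold pvVal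
          simp only [if_pos (by norm_num : (1 : Int) ≠ 0)]
          rw [List.cons_append, pvMerge, if_neg (by omega), if_neg (by omega)]
          ring
    · -- a tagger arrives
      have hOi : pvOnesFrom team i = (i : Int) :: pvOnesFrom team (i + 1) := by
        rw [pvOnesFrom, dif_pos hlen, if_pos (by simp [hx, hx0]), List.singleton_append]
      have hZi : pvZerosFrom team i = pvZerosFrom team (i + 1) := by
        rw [pvZerosFrom, dif_pos hlen, if_neg (by simp [hx, hx0]), List.nil_append]
      cases pending with
      | nil =>
        by_cases hd : (0 : Int) ≥ dist
        · have hstep : pvStepB dist (cnt, kind, []) ((i : Int), x) = (cnt, 1, []) := by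
            simp [pvStepB, hx0, hd]
          rw [hstep, ih (i + 1) cnt 1 [] hrest (Or.inr rfl) (by simp) (by simp)]
          rw [hOi, hZi]
          have hso := pvMerge_skip_one dist (i : Int) (pvOnesFrom team (i + 1))
            (pvZerosFrom team (i + 1))
            (fun z hz => by have := hge_z z hz; omega)
            (fun o ho => hge_o o ho)
          rcases hk with hk | hk <;> simp [pvVal, hk, hso]
        · have hstep : pvStepB dist (cnt, kind, []) ((i : Int), x) = (cnt, 1, [(i : Int)]) := by
            simp [pvStepB, hx0, hd]
          rw [hstep, ih (i + 1) cnt 1 [(i : Int)] hrest (Or.inr rfl) (by simp)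
            (by simp; omega)]
          rw [hOi, hZi]
          rcases hk with hk | hk <;> simp [pvVal, hk]
      | cons p0 ptail =>
        obtain ⟨hp0l, hp0u⟩ := hmem p0 (by simp)
        have hdist1 : (1 : Int) ≤ dist := by omega
        rcases List.pairwise_cons.mp hpw with ⟨hlt, hpw'⟩
        rcases hk with hk | hk
        · -- pending are non-taggers: match the head, eviction cannot fire
          subst hk
          have hstep : pvStepB dist (cnt, 0, p0 :: ptail) ((i : Int), x)
              = (cnt + 1, 0, ptail) := by
            cases ptail with
            | nil => simp [pvStepB, hx0]
            | cons q r =>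
              have hq : ¬ ((i : Int) - q ≥ dist) := by
                have := hlt q (by simp); omega
              simp [pvStepB, hx0, hq]
          rw [hstep, ih (i + 1) (cnt + 1) 0 ptail hrest (Or.inl rfl) hpw'
            (by intro p hp; have := hmem p (by simp [hp]); have := hlt p hp; push_cast; omega)]
          rw [hOi, hZi]
          unfold pvVal
          simp only [if_neg (by simp : ¬ (0 : Int) ≠ 0)]
          rw [List.cons_append, pvMerge, if_neg (by omega), if_neg (by omega)]
          ring
        · -- pending are taggers too: enqueue, maybe evict the head
          subst hk
          have hpwApp : (ptail ++ [(i : Int)]).Pairwise (· < ·) :=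
            List.pairwise_append.mpr ⟨hpw', List.pairwise_singleton _ _,
              (by intro a ha b hb; simp at hb; subst hb; exact (hmem a (by simp [ha])).2)⟩
          by_cases hev : (i : Int) - p0 ≥ dist
          · have hstep : pvStepB dist (cnt, 1, p0 :: ptail) ((i : Int), x)
                = (cnt, 1, ptail ++ [(i : Int)]) := by
              simp [pvStepB, hx0, hev]
            rw [hstep, ih (i + 1) cnt 1 (ptail ++ [(i : Int)]) hrest (Or.inr rfl) hpwApp
              (by
                intro p hp
                rcases List.mem_append.mp hp with hp | hp
                · have := hmem p (by simp [hp]); have := hlt p hp; push_cast; omega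
                · simp at hp; subst hp; push_cast; omega)]
            rw [hOi, hZi]
            have hso := pvMerge_skip_one dist p0
              (ptail ++ (i : Int) :: pvOnesFrom team (i + 1)) (pvZerosFrom team (i + 1))
              (fun z hz => by have := hge_z z hz; omega)
              (by
                intro o ho
                rcases List.mem_append.mp ho with ho | ho
                · exact hlt o ho
                · rcases List.mem_cons.mp ho with ho | ho
                  · omega
                  · have := hge_o o ho; omega)
            simp [pvVal, hso, List.append_assoc]
          · have hstep : pvStepB dist (cnt, 1, p0 :: ptail) ((i : Int), x)
                = (cnt, 1, p0 :: ptail ++ [(i : Int)]) := by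
              simp [pvStepB, hx0, hev]
            rw [hstep, ih (i + 1) cnt 1 (p0 :: ptail ++ [(i : Int)]) hrest (Or.inr rfl)
              (List.pairwise_cons.mpr ⟨(by
                  intro a ha
                  rcases List.mem_append.mp ha with ha | ha
                  · exact hlt a ha
                  · simp at ha; subst ha; omega), hpwApp⟩)
              (by
                intro p hp
                rcases List.mem_cons.mp hp with hp | hp
                · subst hp; push_cast; omega
                · rcases List.mem_append.mp hp with hp | hp
                  · have := hmem p (by simp [hp]); have := hlt p hp; push_cast; omega
                  · simp at hp; subst hp; push_cast; omega)]
            rw [hOi, hZi]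
            simp [pvVal, List.append_assoc]

-- ===== VERDICT (by name: the statement is the Claim_ definition above) =====
theorem catchMaximumAmountofPeople_spec : Claim_equal_catchMaximumAmountofPeople := by
  intro team dist _
  unfold Spec_catchMaximumAmountofPeople catchMaximumAmountofPeople catchMaximumAmountofPeople_alt
  have hA := pvLoopA team dist team 0 0 0 (by simp)
  have hB := pvLoopB team dist team 0 0 0 [] (by simp) (Or.inl rfl) (by simp) (by simp)
  simp only [Nat.cast_zero] at hA hB
  rw [hA, hB, pvVal]
  simp
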